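-- pv_equiv track=rewrite | github.com/lucidsoftware/lucid-programming-competition-2023 | problems/FossilFuel/solutions/python3/solution_1.py | getMaxAmountToFeedKids
-- ===== SOURCE A (Python) =====
-- from copy import deepcopy
-- from itertools import combinations
--
-- def checkCombinations(nuggets, numKids, targetAmount, foundSubLists):
--     if (foundSubLists == numKids):
--         return True
--     if sum(nuggets) == targetAmount:
--         if checkCombinations([], numKids, targetAmount, foundSubLists + 1):
--             return True
--     combinationsThatSumToTargetAmount = [seq for i in range(len(nuggets)) for seq in combinations(nuggets, i) if sum(seq) == targetAmount]
--     for combination in combinationsThatSumToTargetAmount: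
--         nugs = deepcopy(nuggets)
--         for nugget in combination:
--             nugs.remove(nugget)
--         if checkCombinations(nugs, numKids, targetAmount, foundSubLists + 1):
--             return True
--     return False
--
-- def getMaxAmountToFeedKids(numKids, nuggetSizes, totalFood):
--     # Without this check, test case 8 will timeout
--     if numKids > len(nuggetSizes):
--         return 0
--     for targetAmount in range(totalFood // numKids, 0, -1):
--         nuggets = deepcopy(nuggetSizes)
--         result = checkCombinations(nuggets, numKids, targetAmount, 0)
--         if result:
--             return targetAmount
--     return 0
-- ===== SOURCE B (Python) =====
-- def canFeed(nuggets, needs):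
--     # needs[i] = amount still missing for kid i; success when every kid is exactly satisfied
--     if all(r == 0 for r in needs):
--         return True
--     if not nuggets:
--         return False
--     x, rest = nuggets[0], nuggets[1:]
--     if canFeed(rest, needs):  # nugget x is left over
--         return True
--     for i in range(len(needs)):  # give nugget x to kid i
--         if canFeed(rest, needs[:i] + [needs[i] - x] + needs[i + 1:]):
--             return True
--     return False
--
-- def getMaxAmountToFeedKids(numKids, nuggetSizes, totalFood):
--     if numKids < 1 or numKids > len(nuggetSizes):
--         return 0
--     for target in range(totalFood // numKids, 0, -1):
--         if canFeed(nuggetSizes, [target] * numKids):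
--             return target
--     return 0
-- ===== Notes on version B (the rewrite author's own statement) =====
-- stated objective: alternative
-- what changed: A searches per kid, enumerating every combination of the remaining nuggets that sums to the target (itertools.combinations at each recursion level, with deepcopy and remove); B searches per nugget, deciding for each nugget in turn whether to discard it or give it to one of the kids, tracking only the k remaining amounts.
import Mathlib
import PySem

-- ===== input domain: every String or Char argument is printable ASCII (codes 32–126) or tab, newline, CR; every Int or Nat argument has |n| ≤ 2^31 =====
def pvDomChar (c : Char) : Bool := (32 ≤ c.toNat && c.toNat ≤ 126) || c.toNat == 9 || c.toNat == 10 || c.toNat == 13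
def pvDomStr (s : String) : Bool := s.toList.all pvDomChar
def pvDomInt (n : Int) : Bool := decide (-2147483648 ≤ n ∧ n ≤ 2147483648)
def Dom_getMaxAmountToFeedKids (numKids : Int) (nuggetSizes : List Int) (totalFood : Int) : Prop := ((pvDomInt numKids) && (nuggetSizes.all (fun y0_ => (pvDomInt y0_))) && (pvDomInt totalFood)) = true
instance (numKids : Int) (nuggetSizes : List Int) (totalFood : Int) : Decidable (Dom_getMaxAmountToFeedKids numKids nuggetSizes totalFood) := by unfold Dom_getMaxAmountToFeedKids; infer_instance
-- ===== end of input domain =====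

-- B replaces A's per-kid enumeration of all equal-sum combinations by a per-nugget
-- assignment search (give each nugget to one kid or discard it) — a different
-- algorithm of similar exponential cost (objective: alternative, no speed claim).

-- ===== PORT A =====

-- `for nugget in combination: nugs.remove(nugget)`; the `.getD acc` default is Python's
-- ValueError branch, unreachable here because every combination is a sub-multiset of nugs.
def pvRemoveAll (nugs : List Int) (combination : List Int) : List Int :=
  combination.foldl (fun acc v => (PySem.List.remove? acc v).getD acc) nugs

-- literal port of checkCombinations; `fuel` bounds the recursion depth (the Python
-- recursion depth is at most nuggets.length + 2 whenever targetAmount ≠ 0, proved below).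
def checkCombinationsA : Nat → List Int → Int → Int → Int → Bool
  | 0, _, _, _, _ => false
  | fuel + 1, nuggets, numKids, targetAmount, foundSubLists =>
    if foundSubLists == numKids then true
    else
      let b1 := if nuggets.sum == targetAmount then
          checkCombinationsA fuel [] numKids targetAmount (foundSubLists + 1)
        else false
      if b1 then true
      else
        let combos := (List.range nuggets.length).flatMap (fun i =>
          (PySem.List.combinations nuggets i).filter (fun seq => seq.sum == targetAmount))
        combos.any (fun c =>
          checkCombinationsA fuel (pvRemoveAll nuggets c) numKids targetAmount (foundSubLists + 1))

-- `for targetAmount in range(...): if result: return targetAmount` / `return 0`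
def pvFirstTargetA (ts : List Int) (p : Int → Bool) : Int :=
  match ts with
  | [] => 0
  | t :: ts' => if p t then t else pvFirstTargetA ts' p

def getMaxAmountToFeedKids (numKids : Int) (nuggetSizes : List Int) (totalFood : Int) : Int :=
  if numKids > nuggetSizes.length then 0
  else
    pvFirstTargetA (PySem.List.pyRange (PySem.Int.floordiv totalFood numKids) 0 (-1))
      (fun targetAmount =>
        checkCombinationsA (nuggetSizes.length + 2) nuggetSizes numKids targetAmount 0)

-- ===== PORT B =====

-- literal port of Source B's canFeed: give the first nugget to some kid or discard it.
def canFeedB : List Int → List Int → Bool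
  | nuggets, needs =>
    if needs.all (fun r => r == 0) then true
    else
      match nuggets with
      | [] => false
      | x :: rest =>
        canFeedB rest needs ||
          (List.range needs.length).any (fun i =>
            canFeedB rest (needs.take i ++ [needs[i]?.getD 0 - x] ++ needs.drop (i + 1)))

def getMaxAmountToFeedKids_alt (numKids : Int) (nuggetSizes : List Int) (totalFood : Int) : Int :=
  if numKids < 1 || numKids > nuggetSizes.length then 0
  else
    ((PySem.List.pyRange (PySem.Int.floordiv totalFood numKids) 0 (-1)).find? (fun target =>
        canFeedB nuggetSizes (List.replicate numKids.toNat target))).getD 0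

-- ===== PRECONDITION & SPEC =====
-- Pre_ excludes only numKids = 0, where Python A raises ZeroDivisionError on totalFood // numKids.
def Pre_getMaxAmountToFeedKids (numKids : Int) (nuggetSizes : List Int) (totalFood : Int) : Prop :=
  numKids ≠ 0
instance (numKids : Int) (nuggetSizes : List Int) (totalFood : Int) : Decidable (Pre_getMaxAmountToFeedKids numKids nuggetSizes totalFood) := by unfold Pre_getMaxAmountToFeedKids; infer_instance
def pvWitness_getMaxAmountToFeedKids : Int × List Int × Int := (2, [1, 2, 3], 6)

def Spec_getMaxAmountToFeedKids (numKids : Int) (nuggetSizes : List Int) (totalFood : Int) (out : Int) : Prop := out = getMaxAmountToFeedKids_alt numKids nuggetSizes totalFood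
instance (numKids : Int) (nuggetSizes : List Int) (totalFood : Int) (out : Int) : Decidable (Spec_getMaxAmountToFeedKids numKids nuggetSizes totalFood out) := by unfold Spec_getMaxAmountToFeedKids; infer_instance

-- ===== CLAIM (what is proved, stated in full; the proofs are below) =====
def Claim_equal_getMaxAmountToFeedKids : Prop := ∀ (numKids : Int) (nuggetSizes : List Int) (totalFood : Int), Dom_getMaxAmountToFeedKids numKids nuggetSizes totalFood → Pre_getMaxAmountToFeedKids numKids nuggetSizes totalFood → Spec_getMaxAmountToFeedKids numKids nuggetSizes totalFood (getMaxAmountToFeedKids numKids nuggetSizes totalFood)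

-- ===== LEMMAS AND PROOFS =====

-- `FeedsP m needs` : m contains pairwise-disjoint sub-multisets, one per entry of
-- needs, the i-th summing to needs[i].  Both searches decide this predicate.
def FeedsP : Multiset Int → List Int → Prop
  | _, [] => True
  | m, r :: rs => ∃ c : Multiset Int, c ≤ m ∧ c.sum = r ∧ FeedsP (m - c) rs

theorem feedsP_mono {m m' : Multiset Int} (h : m ≤ m') :
    ∀ {needs : List Int}, FeedsP m needs → FeedsP m' needs := by
  intro needs
  induction needs generalizing m m' with
  | nil => intro _; trivial
  | cons r rs ih =>
    rintro ⟨c, hc, hs, hrec⟩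
    exact ⟨c, hc.trans h, hs, ih (tsub_le_tsub_right h c) hrec⟩

theorem feedsP_of_all_zero {m : Multiset Int} :
    ∀ {needs : List Int}, (∀ r ∈ needs, r = 0) → FeedsP m needs := by
  intro needs
  induction needs generalizing m with
  | nil => intro _; trivial
  | cons r rs ih =>
    intro h
    exact ⟨0, Multiset.zero_le m, by simpa using (h r (by simp)).symm,
      ih (fun r hr => h r (by simp [hr]))⟩

theorem feedsP_zero_iff : ∀ {needs : List Int}, FeedsP 0 needs ↔ ∀ r ∈ needs, r = 0 := by
  intro needs
  induction needs with
  | nil => simp [FeedsP]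
  | cons r rs ih =>
    constructor
    · rintro ⟨c, hc, hs, hrec⟩
      have hc0 : c = 0 := Multiset.le_zero.mp hc
      subst hc0
      simp only [Multiset.sum_zero] at hs
      simp only [Multiset.zero_sub] at hrec
      intro a ha
      rcases List.mem_cons.mp ha with h1 | h2
      · omega
      · exact ih.mp hrec a h2
    · intro h; exact feedsP_of_all_zero h

theorem feedsP_cons_iff (x : Int) :
    ∀ (needs : List Int) (m : Multiset Int),
    FeedsP (x ::ₘ m) needs ↔
      FeedsP m needs ∨ ∃ i, i < needs.length ∧ FeedsP m (needs.set i (needs.getD i 0 - x)) := by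
  intro needs
  induction needs with
  | nil => intro m; simp [FeedsP]
  | cons r rs ih =>
    intro m
    constructor
    · rintro ⟨c, hc, hs, hrec⟩
      by_cases hx : x ∈ c
      · refine Or.inr ⟨0, by simp, ?_⟩
        have hced : x ::ₘ c.erase x = c := Multiset.cons_erase hx
        refine ⟨c.erase x, Multiset.erase_le_iff_le_cons.mpr hc, ?_, ?_⟩
        · have := congrArg Multiset.sum hced
          simp only [Multiset.sum_cons] at this
          simp only [List.getD_cons_zero]
          omega
        · have hsub : (x ::ₘ m) - c = m - c.erase x := by
            rw [← hced, Multiset.sub_cons, Multiset.erase_cons_head, Multiset.erase_cons_head]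
          rw [hsub] at hrec
          simpa using hrec
      · have hc2 : c ≤ m := (Multiset.le_cons_of_notMem hx).mp hc
        have hsub : (x ::ₘ m) - c = x ::ₘ (m - c) := Multiset.cons_sub_of_le x hc2
        rw [hsub] at hrec
        rcases (ih (m - c)).mp hrec with h | ⟨i, hi, hF⟩
        · exact Or.inl ⟨c, hc2, hs, h⟩
        · refine Or.inr ⟨i + 1, by simpa using hi, ?_⟩
          exact ⟨c, hc2, hs, by simpa using hF⟩
    · rintro (h | ⟨i, hi, hF⟩)
      · exact feedsP_mono (Multiset.le_cons_self m x) h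
      · match i, hi with
        | 0, _ =>
          simp only [List.set_cons_zero, List.getD_cons_zero] at hF
          rcases hF with ⟨c', hc', hs', hrec'⟩
          refine ⟨x ::ₘ c', Multiset.cons_le_cons x hc', by simp [hs'], ?_⟩
          rwa [Multiset.sub_cons, Multiset.erase_cons_head]
        | j + 1, hi =>
          simp only [List.set_cons_succ, List.getD_cons_succ] at hF
          rcases hF with ⟨c, hc, hs, hrec⟩
          have hj : j < rs.length := by simpa using hi
          have : FeedsP (x ::ₘ (m - c)) rs := (ih (m - c)).mpr (Or.inr ⟨j, hj, hrec⟩)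
          exact ⟨c, hc.trans (Multiset.le_cons_self m x), hs,
            by rwa [Multiset.cons_sub_of_le x hc]⟩

theorem pv_slice_set (needs : List Int) (i : Nat) (a : Int) (h : i < needs.length) :
    needs.take i ++ [a] ++ needs.drop (i + 1) = needs.set i a := by
  rw [List.set_eq_take_append_cons_drop, if_pos h]; simp

theorem canFeedB_iff : ∀ (nuggets needs : List Int),
    canFeedB nuggets needs = true ↔ FeedsP (↑nuggets) needs := by
  intro nuggets
  induction nuggets with
  | nil =>
    intro needs
    rw [canFeedB]
    have hz : (↑([] : List Int) : Multiset Int) = 0 := rfl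
    rw [hz, feedsP_zero_iff]
    by_cases h : ∀ r ∈ needs, r = 0
    · rw [if_pos (by simpa [List.all_eq_true] using h)]
      simpa using h
    · rw [if_neg (by simpa [List.all_eq_true] using h)]
      simp [h]
  | cons x rest ih =>
    intro needs
    rw [canFeedB]
    by_cases h : needs.all (fun r => r == 0)
    · simp only [h, if_true]
      simp only [List.all_eq_true, beq_iff_eq] at h
      simpa using (feedsP_of_all_zero (m := ↑(x :: rest)) h)
    · simp only [h, if_neg, Bool.not_eq_true]
      have hcoe : ((x :: rest : List Int) : Multiset Int) = x ::ₘ ↑rest := by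
        simp
      rw [hcoe, feedsP_cons_iff]
      constructor
      · intro hc
        rcases Bool.or_eq_true_iff.mp hc with h1 | h2
        · exact Or.inl ((ih needs).mp h1)
        · rcases List.any_eq_true.mp h2 with ⟨i, hmem, hF⟩
          have hi : i < needs.length := List.mem_range.mp hmem
          refine Or.inr ⟨i, hi, ?_⟩
          rw [List.getD_eq_getElem?_getD]
          have := (ih _).mp hF
          rwa [pv_slice_set needs i _ hi] at this
      · rintro (h1 | ⟨i, hi, hF⟩)
        · exact Bool.or_eq_true_iff.mpr (Or.inl ((ih needs).mpr h1))
        · rw [List.getD_eq_getElem?_getD] at hF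
          refine Bool.or_eq_true_iff.mpr (Or.inr (List.any_eq_true.mpr ⟨i, List.mem_range.mpr hi, ?_⟩))
          apply (ih _).mpr
          rwa [pv_slice_set needs i _ hi]

theorem pvRemoveAll_coe : ∀ (c l : List Int), (↑c : Multiset Int) ≤ ↑l →
    (↑(pvRemoveAll l c) : Multiset Int) = ↑l - ↑c := by
  intro c
  induction c with
  | nil => intro l _; simp [pvRemoveAll]
  | cons v cs ih =>
    intro l hle
    have hv : v ∈ l := by
      have h0 : (v : Int) ∈ (↑(v :: cs) : Multiset Int) := by simp
      have := Multiset.mem_of_le hle h0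
      simpa using this
    have hstep : pvRemoveAll l (v :: cs) = pvRemoveAll (l.erase v) cs := by
      simp [pvRemoveAll, List.foldl_cons, PySem.List.remove?_eq_some_erase l v hv]
    have hcs : (↑cs : Multiset Int) ≤ ↑(l.erase v) := by
      have h2 : v ::ₘ (↑cs : Multiset Int) ≤ ↑l := by simpa using hle
      have := Multiset.erase_le_erase v h2
      simpa [Multiset.coe_erase] using this
    rw [hstep, ih _ hcs]
    have hc : (↑(v :: cs) : Multiset Int) = v ::ₘ ↑cs := by simp
    rw [hc, Multiset.sub_cons, ← Multiset.coe_erase]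

theorem length_pvRemoveAll (c l : List Int) (h : (↑c : Multiset Int) ≤ ↑l) :
    (pvRemoveAll l c).length = l.length - c.length := by
  have hcard := congrArg Multiset.card (pvRemoveAll_coe c l h)
  rw [Multiset.card_sub h] at hcard
  simpa using hcard

theorem feedsP_replicate_zero {j : Nat} {t : Int} (ht : t ≠ 0)
    (h : FeedsP 0 (List.replicate j t)) : j = 0 := by
  rcases j with _ | j
  · rfl
  · exact absurd (feedsP_zero_iff.mp h t (by simp)) ht

theorem checkCombinationsA_iff : ∀ (fuel : Nat) (l : List Int) (k t f : Int), t ≠ 0 →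
    l.length + 1 ≤ fuel →
    (checkCombinationsA fuel l k t f = true ↔
      ∃ j : Nat, k = f + j ∧ FeedsP (↑l) (List.replicate j t)) := by
  intro fuel
  induction fuel with
  | zero => intro l k t f _ h; omega
  | succ fuel ih =>
    intro l k t f ht hlen
    rw [checkCombinationsA]
    simp only [beq_iff_eq]
    by_cases hfk : f = k
    · rw [if_pos hfk]
      exact ⟨fun _ => ⟨0, by omega, by trivial⟩, fun _ => rfl⟩
    · rw [if_neg hfk]
      rw [show ∀ (b x : Bool), (if b then true else x) = (b || x) from by
        intro b x; cases b <;> simp]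
      -- the combination branch, as a standalone iff
      have hany : ((List.range l.length).flatMap (fun i =>
            (PySem.List.combinations l i).filter (fun seq => seq.sum = t))).any
            (fun c => checkCombinationsA fuel (pvRemoveAll l c) k t (f + 1)) = true ↔
          (∃ c' : List Int, List.Sublist c' l ∧ c'.length < l.length ∧ c'.sum = t ∧
            ∃ j' : Nat, k = (f + 1) + j' ∧ FeedsP (↑l - ↑c') (List.replicate j' t)) := by
        constructor
        · intro h
          rcases List.any_eq_true.mp h with ⟨c, hcmem, hrec⟩
          rcases List.mem_flatMap.mp hcmem with ⟨i, hir, hcf⟩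
          rcases List.mem_filter.mp hcf with ⟨hcc, hcsum⟩
          rcases (PySem.List.mem_combinations_iff l i c).mp hcc with ⟨hsub, hclen⟩
          have hilt : i < l.length := List.mem_range.mp hir
          have hcsum' : c.sum = t := by simpa using hcsum
          have hcle : (↑c : Multiset Int) ≤ ↑l := Multiset.coe_le.mpr hsub.subperm
          have hcne : c ≠ [] := by rintro rfl; simp at hcsum'; exact ht hcsum'.symm
          have hflen : (pvRemoveAll l c).length + 1 ≤ fuel := by
            have := length_pvRemoveAll c l hcle
            have hc1 : 1 ≤ c.length := by
              cases c with | nil => exact absurd rfl hcne | cons a b => simp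
            omega
          rcases (ih _ k t (f + 1) ht hflen).mp hrec with ⟨j', hj', hF⟩
          rw [pvRemoveAll_coe c l hcle] at hF
          exact ⟨c, hsub, by omega, hcsum', j', hj', hF⟩
        · rintro ⟨c', hsub, hlt, hsum', j', hj', hF⟩
          have hcle : (↑c' : Multiset Int) ≤ ↑l := Multiset.coe_le.mpr hsub.subperm
          have hcne : c' ≠ [] := by rintro rfl; simp at hsum'; exact ht hsum'.symm
          apply List.any_eq_true.mpr
          refine ⟨c', List.mem_flatMap.mpr ⟨c'.length, List.mem_range.mpr hlt,
            List.mem_filter.mpr ⟨(PySem.List.mem_combinations_iff l c'.length c').mpr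
              ⟨hsub, rfl⟩, by simpa using hsum'⟩⟩, ?_⟩
          have hflen : (pvRemoveAll l c').length + 1 ≤ fuel := by
            have := length_pvRemoveAll c' l hcle
            have hc1 : 1 ≤ c'.length := by
              cases c' with | nil => exact absurd rfl hcne | cons a b => simp
            omega
          apply (ih _ k t (f + 1) ht hflen).mpr
          rw [pvRemoveAll_coe c' l hcle]
          exact ⟨j', hj', hF⟩
      by_cases hs : l.sum = t
      · rw [if_pos hs]
        have hlne : l ≠ [] := by rintro rfl; simp at hs; exact ht hs.symm
        have hl1 : 1 ≤ l.length := by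
          cases l with | nil => exact absurd rfl hlne | cons a b => simp
        have hrec0 : checkCombinationsA fuel [] k t (f + 1) = true ↔ k = f + 1 := by
          rw [ih [] k t (f + 1) ht (by simpa using (by omega : 1 ≤ fuel))]
          constructor
          · rintro ⟨j, hj, hF⟩
            have := feedsP_replicate_zero ht (by simpa using hF)
            omega
          · intro h; exact ⟨0, by omega, by trivial⟩
        constructor
        · intro hc
          rcases Bool.or_eq_true_iff.mp hc with hb1 | hany1
          · have hk1 : k = f + 1 := hrec0.mp hb1
            refine ⟨1, by omega, ?_⟩
            rw [List.replicate_one]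
            exact ⟨↑l, le_refl _, by simpa [Multiset.sum_coe] using hs, by trivial⟩
          · rcases hany.mp hany1 with ⟨c', hsub, hlt, hsum', j', hj', hF⟩
            refine ⟨j' + 1, by push_cast; omega, ?_⟩
            rw [List.replicate_succ]
            exact ⟨↑c', Multiset.coe_le.mpr hsub.subperm, by simpa using hsum', hF⟩
        · rintro ⟨j, hj, hF⟩
          rcases j with _ | j''
          · exact absurd (by simpa using hj : k = f).symm hfk
          · rw [List.replicate_succ] at hF
            rcases hF with ⟨c, hc, hcsum, hrec⟩
            obtain ⟨cl, rfl⟩ : ∃ cl : List Int, c = ↑cl := ⟨c.toList, by simp⟩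
            obtain ⟨c', hperm, hsub⟩ := Multiset.coe_le.mp hc
            have hcoe : (↑c' : Multiset Int) = ↑cl := Multiset.coe_eq_coe.mpr hperm
            have hsum' : c'.sum = t := by
              have := hperm.sum_eq
              simpa [this] using hcsum
            rcases Nat.lt_or_ge c'.length l.length with hlt | hge
            · refine Bool.or_eq_true_iff.mpr (Or.inr (hany.mpr ⟨c', hsub, hlt, hsum', j'',
                by push_cast at hj ⊢; omega, ?_⟩))
              rwa [hcoe]
            · have hceq : c' = l := (List.Sublist.length_eq hsub).mp
                (le_antisymm hsub.length_le hge)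
              subst hceq
              have hj0 : j'' = 0 := by
                apply feedsP_replicate_zero ht
                rwa [← hcoe, tsub_self] at hrec
              exact Bool.or_eq_true_iff.mpr (Or.inl (hrec0.mpr (by push_cast at hj; omega)))
      · rw [if_neg hs]
        simp only [Bool.false_or]
        constructor
        · intro h
          rcases hany.mp h with ⟨c', hsub, hlt, hsum', j', hj', hF⟩
          refine ⟨j' + 1, by push_cast; omega, ?_⟩
          rw [List.replicate_succ]
          exact ⟨↑c', Multiset.coe_le.mpr hsub.subperm, by simpa using hsum', hF⟩
        · rintro ⟨j, hj, hF⟩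
          rcases j with _ | j''
          · exact absurd (by simpa using hj : k = f).symm hfk
          · rw [List.replicate_succ] at hF
            rcases hF with ⟨c, hc, hcsum, hrec⟩
            obtain ⟨cl, rfl⟩ : ∃ cl : List Int, c = ↑cl := ⟨c.toList, by simp⟩
            obtain ⟨c', hperm, hsub⟩ := Multiset.coe_le.mp hc
            have hcoe : (↑c' : Multiset Int) = ↑cl := Multiset.coe_eq_coe.mpr hperm
            have hsum' : c'.sum = t := by
              have := hperm.sum_eq
              simpa [this] using hcsum
            rcases Nat.lt_or_ge c'.length l.length with hlt | hge
            · refine hany.mpr ⟨c', hsub, hlt, hsum', j'', by push_cast at hj ⊢; omega, ?_⟩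
              rwa [hcoe]
            · have hceq : c' = l := (List.Sublist.length_eq hsub).mp
                (le_antisymm hsub.length_le hge)
              exact absurd (hceq ▸ hsum') hs

theorem check_eq_canFeed (l : List Int) (k t : Int) (hk : 1 ≤ k) (ht : t ≠ 0) :
    checkCombinationsA (l.length + 2) l k t 0 = canFeedB l (List.replicate k.toNat t) := by
  apply Bool.eq_iff_iff.mpr
  rw [checkCombinationsA_iff (l.length + 2) l k t 0 ht (by omega), canFeedB_iff]
  constructor
  · rintro ⟨j, hj, hF⟩
    have : k.toNat = j := by omega
    rwa [this]
  · intro hF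
    exact ⟨k.toNat, by omega, hF⟩

theorem check_false_of_neg (l : List Int) (k t : Int) (hk : k < 0) (ht : t ≠ 0) :
    checkCombinationsA (l.length + 2) l k t 0 = false := by
  cases h : checkCombinationsA (l.length + 2) l k t 0 with
  | false => rfl
  | true =>
    exfalso
    rcases (checkCombinationsA_iff (l.length + 2) l k t 0 ht (by omega)).mp h with ⟨j, hj, _⟩
    omega

theorem firstA_zero (p : Int → Bool) : ∀ (ts : List Int), (∀ t ∈ ts, p t = false) →
    pvFirstTargetA ts p = 0 := by
  intro ts
  induction ts with
  | nil => intro _; rfl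
  | cons t ts' ih =>
    intro h
    rw [pvFirstTargetA]
    rw [h t (by simp), if_neg (by simp)]
    exact ih (fun x hx => h x (by simp [hx]))

theorem firstA_find (p q : Int → Bool) : ∀ (ts : List Int), (∀ t ∈ ts, p t = q t) →
    pvFirstTargetA ts p = (ts.find? q).getD 0 := by
  intro ts
  induction ts with
  | nil => intro _; rfl
  | cons t ts' ih =>
    intro h
    rw [pvFirstTargetA]
    by_cases hp : p t = true
    · rw [if_pos hp, List.find?_cons_of_pos (by rw [← h t (by simp)]; exact hp)]
      rfl
    · have hpf : p t = false := by simpa using hp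
      rw [if_neg (by simp [hpf]), List.find?_cons_of_neg (by rw [← h t (by simp)]; simp [hpf])]
      exact ih (fun x hx => h x (by simp [hx]))

theorem main_eq (numKids : Int) (nuggetSizes : List Int) (totalFood : Int)
    (hpre : numKids ≠ 0) :
    getMaxAmountToFeedKids numKids nuggetSizes totalFood
      = getMaxAmountToFeedKids_alt numKids nuggetSizes totalFood := by
  rw [getMaxAmountToFeedKids, getMaxAmountToFeedKids_alt]
  by_cases hgt : numKids > (nuggetSizes.length : Int)
  · rw [if_pos hgt, if_pos (by simp [hgt])]
  · rw [if_neg hgt]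
    by_cases hk1 : numKids < 1
    · have hkneg : numKids < 0 := by omega
      rw [if_pos (by simp [hk1])]
      apply firstA_zero
      intro t htmem
      have ht : t ≠ 0 := by
        have := PySem.List.mem_pyRange_neg_one.mp htmem
        omega
      exact check_false_of_neg nuggetSizes numKids t hkneg ht
    · rw [if_neg (by simp [hk1, hgt])]
      apply firstA_find
      intro t htmem
      have ht : t ≠ 0 := by
        have := PySem.List.mem_pyRange_neg_one.mp htmem
        omega
      exact check_eq_canFeed nuggetSizes numKids t (by omega) ht

-- ===== VERDICT (by name: the statement is the Claim_ definition above) =====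
theorem getMaxAmountToFeedKids_spec : Claim_equal_getMaxAmountToFeedKids := by
  intro numKids nuggetSizes totalFood _ hpre
  unfold Spec_getMaxAmountToFeedKids
  exact main_eq numKids nuggetSizes totalFood hpre
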